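-- pv_equiv track=rewrite | github.com/NoctuG/seo-dashboard | backend/app/analytics_service.py | _aggregate_brand_split
-- ===== SOURCE A (Python) =====
-- from typing import Any, Dict, List, Optional
--
-- def _aggregate_brand_split(segments: List[Dict[str, Any]]) -> Dict[str, Dict[str, int]]:
--     brand_sessions = sum(int(item.get("brand_sessions", 0)) for item in segments)
--     non_brand_sessions = sum(int(item.get("non_brand_sessions", 0)) for item in segments)
--     brand_conversions = sum(int(item.get("brand_conversions", 0)) for item in segments)
--     non_brand_conversions = sum(int(item.get("non_brand_conversions", 0)) for item in segments)
--     return {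
--         "brand": {"sessions": brand_sessions, "conversions": brand_conversions},
--         "non_brand": {"sessions": non_brand_sessions, "conversions": non_brand_conversions},
--     }
-- ===== SOURCE B (Python) =====
-- from typing import Any, Dict, List
--
-- def _aggregate_brand_split(segments: List[Dict[str, Any]]) -> Dict[str, Dict[str, int]]:
--     # Divide and conquer: recursively aggregate each half, then merge the two
--     # result dicts field-wise.  Correct because integer addition is associative
--     # and commutative, so any grouping of the per-item contributions gives the
--     # same four totals as A's linear sums.
--     n = len(segments)
--     if n == 0:
--         return {"brand": {"sessions": 0, "conversions": 0},
--                 "non_brand": {"sessions": 0, "conversions": 0}}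
--     if n == 1:
--         item = segments[0]
--         return {"brand": {"sessions": int(item.get("brand_sessions", 0)),
--                           "conversions": int(item.get("brand_conversions", 0))},
--                 "non_brand": {"sessions": int(item.get("non_brand_sessions", 0)),
--                               "conversions": int(item.get("non_brand_conversions", 0))}}
--     mid = n // 2
--     left = _aggregate_brand_split(segments[:mid])
--     right = _aggregate_brand_split(segments[mid:])
--     return {g: {k: left[g][k] + right[g][k] for k in ("sessions", "conversions")}
--             for g in ("brand", "non_brand")}
-- ===== Notes on version B (the rewrite author's own statement) =====
-- stated objective: alternative
-- what changed: Replaces the four linear sum-comprehension scans with a recursive divide-and-conquer: split the list in half, aggregate each half recursively, and merge the two nested result dicts field-wise.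
import Mathlib
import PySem

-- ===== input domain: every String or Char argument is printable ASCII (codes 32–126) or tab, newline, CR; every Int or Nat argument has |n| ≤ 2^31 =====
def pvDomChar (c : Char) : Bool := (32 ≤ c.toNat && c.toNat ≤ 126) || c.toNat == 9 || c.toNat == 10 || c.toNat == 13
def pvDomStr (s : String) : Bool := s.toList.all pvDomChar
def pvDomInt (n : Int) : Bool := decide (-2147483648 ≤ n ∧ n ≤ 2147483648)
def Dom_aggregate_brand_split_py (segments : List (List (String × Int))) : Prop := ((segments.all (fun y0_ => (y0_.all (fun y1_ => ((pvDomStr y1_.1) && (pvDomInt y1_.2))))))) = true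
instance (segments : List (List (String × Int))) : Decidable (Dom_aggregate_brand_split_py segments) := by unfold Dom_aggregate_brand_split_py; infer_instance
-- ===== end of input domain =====

-- B replaces A's four linear sum-comprehension scans with a recursive divide-and-conquer
-- that aggregates each half of the list and merges the two nested result dicts (objective: alternative).

-- ===== PORT A =====
-- item.get(k, 0): first-match association-list lookup with default 0
def pyDictGetD (item : List (String × Int)) (k : String) : Int :=
  (List.lookup k item).getD 0

-- literal port of A: four separate sum-comprehensions over segments
def aggregate_brand_split_py (segments : List (List (String × Int))) : List (String × List (String × Int)) :=
  let brand_sessions := segments.foldl (fun acc item => acc + pyDictGetD item "brand_sessions") 0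
  let non_brand_sessions := segments.foldl (fun acc item => acc + pyDictGetD item "non_brand_sessions") 0
  let brand_conversions := segments.foldl (fun acc item => acc + pyDictGetD item "brand_conversions") 0
  let non_brand_conversions := segments.foldl (fun acc item => acc + pyDictGetD item "non_brand_conversions") 0
  [("brand", [("sessions", brand_sessions), ("conversions", brand_conversions)]),
   ("non_brand", [("sessions", non_brand_sessions), ("conversions", non_brand_conversions)])]

-- ===== PORT B =====
-- d[g][k] on B's result dicts: both keys are always present, so the first-match
-- lookup with default 0 is exact here (Python's KeyError is unreachable)
def pyIdx2 (d : List (String × List (String × Int))) (g k : String) : Int :=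
  (List.lookup k ((List.lookup g d).getD [])).getD 0

-- port of B: split at len//2, recurse on both halves, merge field-wise
def aggregate_brand_split_py_alt (segments : List (List (String × Int))) : List (String × List (String × Int)) :=
  match segments with
  | [] =>
      [("brand", [("sessions", 0), ("conversions", 0)]),
       ("non_brand", [("sessions", 0), ("conversions", 0)])]
  | [item] =>
      [("brand", [("sessions", pyDictGetD item "brand_sessions"),
                  ("conversions", pyDictGetD item "brand_conversions")]),
       ("non_brand", [("sessions", pyDictGetD item "non_brand_sessions"),
                      ("conversions", pyDictGetD item "non_brand_conversions")])]
  | x :: y :: rest =>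
      let s := x :: y :: rest
      let mid := s.length / 2
      let left := aggregate_brand_split_py_alt (s.take mid)
      let right := aggregate_brand_split_py_alt (s.drop mid)
      [("brand", [("sessions", pyIdx2 left "brand" "sessions" + pyIdx2 right "brand" "sessions"),
                  ("conversions", pyIdx2 left "brand" "conversions" + pyIdx2 right "brand" "conversions")]),
       ("non_brand", [("sessions", pyIdx2 left "non_brand" "sessions" + pyIdx2 right "non_brand" "sessions"),
                      ("conversions", pyIdx2 left "non_brand" "conversions" + pyIdx2 right "non_brand" "conversions")])]
termination_by segments.length
decreasing_by
  · simp [List.length_take]; omega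
  · simp [List.length_drop]; omega

-- ===== PRECONDITION & SPEC =====
def Spec_aggregate_brand_split_py (segments : List (List (String × Int))) (out : List (String × List (String × Int))) : Prop := out = aggregate_brand_split_py_alt segments
instance (segments : List (List (String × Int))) (out : List (String × List (String × Int))) : Decidable (Spec_aggregate_brand_split_py segments out) := by unfold Spec_aggregate_brand_split_py; infer_instance

-- ===== CLAIM (what is proved, stated in full; the proofs are below) =====
def Claim_equal_aggregate_brand_split_py : Prop := ∀ (segments : List (List (String × Int))), Dom_aggregate_brand_split_py segments → Spec_aggregate_brand_split_py segments (aggregate_brand_split_py segments)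

-- ===== LEMMAS AND PROOFS =====
-- the four per-field totals, as plain map-sums
def sumF (k : String) (s : List (List (String × Int))) : Int :=
  (s.map (fun item => pyDictGetD item k)).sum

lemma foldl_eq_sumF (k : String) (s : List (List (String × Int))) (a : Int) :
    s.foldl (fun acc item => acc + pyDictGetD item k) a = a + sumF k s := by
  induction s generalizing a with
  | nil => simp [sumF]
  | cons x xs ih => simp [List.foldl, ih, sumF]; ring

lemma sumF_split (k : String) (s : List (List (String × Int))) (m : ℕ) :
    sumF k s = sumF k (s.take m) + sumF k (s.drop m) := by
  conv_lhs => rw [← List.take_append_drop m s]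
  simp [sumF]

-- B's recursion returns exactly the canonical dict of the four totals
lemma alt_eq_canonical (s : List (List (String × Int))) :
    aggregate_brand_split_py_alt s =
      [("brand", [("sessions", sumF "brand_sessions" s), ("conversions", sumF "brand_conversions" s)]),
       ("non_brand", [("sessions", sumF "non_brand_sessions" s), ("conversions", sumF "non_brand_conversions" s)])] := by
  induction s using aggregate_brand_split_py_alt.induct with
  | case1 => simp [aggregate_brand_split_py_alt, sumF]
  | case2 item => simp [aggregate_brand_split_py_alt, sumF]
  | case3 x y rest s mid ihL ihR =>
      rw [aggregate_brand_split_py_alt, ihL, ihR]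
      simp [pyIdx2, List.lookup]
      refine ⟨⟨?_, ?_⟩, ?_, ?_⟩ <;> exact (sumF_split _ _ _).symm

-- ===== VERDICT (by name: the statement is the Claim_ definition above) =====
theorem aggregate_brand_split_py_spec : Claim_equal_aggregate_brand_split_py := by
  intro segments _
  unfold Spec_aggregate_brand_split_py aggregate_brand_split_py
  rw [alt_eq_canonical]
  simp [foldl_eq_sumF]
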